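-- pv_equiv track=rewrite | github.com/openai/parameter-golf | HDC_Core_Model/Templates_Tools/grid_templates.py | detect_and_mark_boundary
-- ===== SOURCE A (Python) =====
-- from typing import List, Dict, Tuple, Optional, Any, Callable
-- from copy import deepcopy
--
-- Grid = List[List[int]]
--
-- def mark_boundary(grid: Grid, boundary_color: int = 2, interior_color: int = None) -> Grid:
--     """
--     Mark boundary cells of a filled shape with boundary_color.
--
--     A boundary cell is a non-zero cell that:
--     1. Is on the edge of the grid, OR
--     2. Is adjacent to a zero (background) cell
--
--     This is the key operation for MORPH_OUTLINE tasks.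
--
--     Args:
--         grid: Input grid
--         boundary_color: Color to use for boundary cells
--         interior_color: If specified, use this for interior cells (else keep original)
--
--     Example:
--         Input:  [[1, 1, 1], [1, 1, 1], [1, 1, 1]]
--         Output: [[2, 2, 2], [2, 1, 2], [2, 2, 2]] (with boundary_color=2)
--     """
--     if not grid or not grid[0]:
--         return grid
--
--     height, width = len(grid), len(grid[0])
--     result = deepcopy(grid)
--
--     for y in range(height):
--         for x in range(width):
--             if grid[y][x] != 0:  # Only process non-zero cells
--                 is_boundary = False
--
--                 # Check if on edge of grid
--                 if y == 0 or y == height - 1 or x == 0 or x == width - 1: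
--                     is_boundary = True
--                 else:
--                     # Check if adjacent to zero (4-connected)
--                     for dy, dx in [(-1, 0), (1, 0), (0, -1), (0, 1)]:
--                         ny, nx = y + dy, x + dx
--                         if 0 <= ny < height and 0 <= nx < width:
--                             if grid[ny][nx] == 0:
--                                 is_boundary = True
--                                 break
--
--                 if is_boundary:
--                     result[y][x] = boundary_color
--                 elif interior_color is not None:
--                     result[y][x] = interior_color
--
--     return result
--
-- def detect_and_mark_boundary(grid: Grid) -> Grid:
--     """
--     Detect filled shapes and mark their boundaries with a new color.
--
--     Automatically chooses boundary color based on what's in the grid: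
--     - If grid has color 1, boundary becomes 2
--     - If grid has colors 1-n, boundary becomes n+1 (capped at 9)
--     """
--     if not grid or not grid[0]:
--         return grid
--
--     # Find max color in grid
--     max_color = 0
--     for row in grid:
--         for cell in row:
--             if cell > max_color:
--                 max_color = cell
--
--     # Boundary color is one higher (capped at 9)
--     boundary_color = min(max_color + 1, 9) if max_color > 0 else 1
--
--     return mark_boundary(grid, boundary_color=boundary_color)
-- ===== SOURCE B (Python) =====
-- def detect_and_mark_boundary(grid):
--     if not grid or not grid[0]:
--         return grid
--     h, w = len(grid), len(grid[0])
--     mx = max(0, max(c for row in grid for c in row))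
--     bc = min(mx + 1, 9) if mx > 0 else 1
--     res = [row[:] for row in grid]
--     # pass 1: nonzero cells on the outer frame are boundary
--     for y in range(h):
--         for x in range(w):
--             if grid[y][x] != 0 and (y == 0 or y == h - 1 or x == 0 or x == w - 1):
--                 res[y][x] = bc
--     # pass 2: each zero cell marks its in-bounds nonzero 4-neighbours
--     for y in range(h):
--         for x in range(w):
--             if grid[y][x] == 0:
--                 for ny, nx in ((y - 1, x), (y + 1, x), (y, x - 1), (y, x + 1)):
--                     if 0 <= ny < h and 0 <= nx < w and grid[ny][nx] != 0:
--                         res[ny][nx] = bc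
--     return res
-- ===== Notes on version B (the rewrite author's own statement) =====
-- stated objective: alternative
-- what changed: Instead of testing each nonzero cell for being on the edge or scanning its neighbours for a zero, B marks boundaries in two passes: one pass paints nonzero frame cells, a second pass lets every zero cell paint its in-bounds nonzero 4-neighbours; the max colour is computed with a builtin max over a flattened generator instead of a nested comparison loop.
import Mathlib
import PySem

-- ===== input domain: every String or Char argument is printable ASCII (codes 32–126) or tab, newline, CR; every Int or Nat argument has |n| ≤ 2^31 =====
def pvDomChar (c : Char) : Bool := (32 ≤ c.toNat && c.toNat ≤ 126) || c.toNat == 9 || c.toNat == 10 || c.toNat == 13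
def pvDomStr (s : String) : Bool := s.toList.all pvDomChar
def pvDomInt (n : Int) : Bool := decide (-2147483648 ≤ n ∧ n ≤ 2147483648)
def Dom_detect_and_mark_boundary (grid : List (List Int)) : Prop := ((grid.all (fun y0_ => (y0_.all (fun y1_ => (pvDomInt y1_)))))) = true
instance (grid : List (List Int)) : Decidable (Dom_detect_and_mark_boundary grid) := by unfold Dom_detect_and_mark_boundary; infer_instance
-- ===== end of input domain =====

-- B marks boundary cells in two passes (frame pass + zero cells painting their nonzero neighbours)
-- instead of A's per-cell edge/neighbour test; same result, stated for grids where A raises no IndexError.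


-- Python grid[y][x] / result[y][x] = v; exact for in-range indices (Pre_ keeps every read in range)
def pvGet (g : List (List Int)) (y x : Nat) : Int := (g.getD y []).getD x 0
def pvSet (g : List (List Int)) (y x : Nat) (v : Int) : List (List Int) :=
  g.set y ((g.getD y []).set x v)

-- ===== PORT A =====
-- mark_boundary(grid, boundary_color, interior_color)
def pyMarkBoundary (grid : List (List Int)) (bc : Int) (ic : Option Int) : List (List Int) :=
  if grid = [] ∨ grid.headD [] = [] then grid
  else
    let h := grid.length
    let w := (grid.headD []).length
    (List.range h).foldl (fun result y =>
      (List.range w).foldl (fun result x =>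
        if pvGet grid y x ≠ 0 then
          let isb : Bool :=
            if y = 0 ∨ y = h - 1 ∨ x = 0 ∨ x = w - 1 then true
            else
              [((-1 : Int), (0 : Int)), (1, 0), (0, -1), (0, 1)].any (fun d =>
                decide (0 ≤ (y : Int) + d.1 ∧ (y : Int) + d.1 < (h : Int) ∧
                        0 ≤ (x : Int) + d.2 ∧ (x : Int) + d.2 < (w : Int)) &&
                decide (pvGet grid ((y : Int) + d.1).toNat ((x : Int) + d.2).toNat = 0))
          if isb then pvSet result y x bc
          else
            match ic with
            | some c => pvSet result y x c
            | none => result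
        else result) result) grid

def detect_and_mark_boundary (grid : List (List Int)) : List (List Int) :=
  if grid = [] ∨ grid.headD [] = [] then grid
  else
    let max_color : Int :=
      grid.foldl (fun m row => row.foldl (fun m c => if c > m then c else m) m) 0
    let bc : Int := if max_color > 0 then min (max_color + 1) 9 else 1
    pyMarkBoundary grid bc none

-- ===== PORT B =====
def detect_and_mark_boundary_alt (grid : List (List Int)) : List (List Int) :=
  if grid = [] ∨ grid.headD [] = [] then grid
  else
    let h := grid.length
    let w := (grid.headD []).length
    let mx : Int := max 0 ((PySem.List.max? (grid.flatMap (fun row => row)) (fun c => c)).getD 0)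
    let bc : Int := if mx > 0 then min (mx + 1) 9 else 1
    let res0 := grid.map (fun row => row)
    let res1 := (List.range h).foldl (fun res y =>
      (List.range w).foldl (fun res x =>
        if pvGet grid y x ≠ 0 ∧ (y = 0 ∨ y = h - 1 ∨ x = 0 ∨ x = w - 1) then
          pvSet res y x bc
        else res) res) res0
    (List.range h).foldl (fun res y =>
      (List.range w).foldl (fun res x =>
        if pvGet grid y x = 0 then
          [((y : Int) - 1, (x : Int)), ((y : Int) + 1, (x : Int)),
           ((y : Int), (x : Int) - 1), ((y : Int), (x : Int) + 1)].foldl (fun res q =>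
            if 0 ≤ q.1 ∧ q.1 < (h : Int) ∧ 0 ≤ q.2 ∧ q.2 < (w : Int) ∧
                pvGet grid q.1.toNat q.2.toNat ≠ 0 then
              pvSet res q.1.toNat q.2.toNat bc
            else res) res
        else res) res) res1

-- ===== PRECONDITION & SPEC =====
-- Exactly the inputs where A returns: on a grid whose first row is nonempty, A reads grid[y][x]
-- for every y and every x < len(grid[0]), so a later row shorter than the first raises IndexError.
def Pre_detect_and_mark_boundary (grid : List (List Int)) : Prop :=
  grid = [] ∨ grid.headD [] = [] ∨ ∀ row ∈ grid, (grid.headD []).length ≤ row.length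
instance (grid : List (List Int)) : Decidable (Pre_detect_and_mark_boundary grid) := by
  unfold Pre_detect_and_mark_boundary; infer_instance

def pvWitness_detect_and_mark_boundary : List (List Int) := [[1, 1, 1], [1, 1, 1], [1, 1, 1]]

def Spec_detect_and_mark_boundary (grid : List (List Int)) (out : List (List Int)) : Prop := out = detect_and_mark_boundary_alt grid
instance (grid : List (List Int)) (out : List (List Int)) : Decidable (Spec_detect_and_mark_boundary grid out) := by unfold Spec_detect_and_mark_boundary; infer_instance

-- ===== CLAIM (what is proved, stated in full; the proofs are below) =====
def Claim_equal_detect_and_mark_boundary : Prop := ∀ (grid : List (List Int)), Dom_detect_and_mark_boundary grid → Pre_detect_and_mark_boundary grid → Spec_detect_and_mark_boundary grid (detect_and_mark_boundary grid)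

-- ===== LEMMAS AND PROOFS =====

-- applying one update
theorem pvSet_length (g : List (List Int)) (y x : Nat) (v : Int) :
    (pvSet g y x v).length = g.length := by
  simp [pvSet]

theorem pvSet_rowlen (g : List (List Int)) (y x i : Nat) (v : Int) :
    ((pvSet g y x v).getD i []).length = ((g.getD i []).length) := by
  unfold pvSet
  simp only [List.getD_eq_getElem?_getD, List.getElem?_set]
  split_ifs with h1 h2
  · subst h1; simp [List.getElem?_eq_getElem h2]
  · subst h1; simp [List.getElem?_eq_none (by omega : g.length ≤ y)]
  · rfl

theorem pvGet_pvSet (g : List (List Int)) (a b y x : Nat) (v : Int) :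
    pvGet (pvSet g a b v) y x =
      if a = y ∧ b = x ∧ y < g.length ∧ x < (g.getD y []).length then v
      else pvGet g y x := by
  unfold pvGet pvSet
  simp only [List.getD_eq_getElem?_getD, List.getElem?_set]
  by_cases hay : a = y
  · subst hay
    by_cases ha : a < g.length
    · simp only [ha, if_pos trivial, List.getElem?_set,
        List.getElem?_eq_getElem ha, Option.getD_some]
      by_cases hbx : b = x
      · subst hbx
        by_cases hb : b < g[a].length
        · simp [hb, ha]
        · simp [hb, ha]
      · simp [hbx, ha]
    · simp only [ha, if_pos rfl, if_neg ha, Option.getD_none]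
      simp [List.getElem?_eq_none (by omega : g.length ≤ a), ha]
  · simp [hay]

-- applying a list of updates, all writing the same colour bc
def applyU (bc : Int) (ps : List (Nat × Nat)) (g : List (List Int)) : List (List Int) :=
  ps.foldl (fun r p => pvSet r p.1 p.2 bc) g

theorem applyU_length (bc : Int) (ps : List (Nat × Nat)) (g : List (List Int)) :
    (applyU bc ps g).length = g.length := by
  induction ps generalizing g with
  | nil => rfl
  | cons p t ih => simpa [applyU, pvSet_length] using (ih (pvSet g p.1 p.2 bc)).trans (by simp [pvSet_length])

theorem applyU_rowlen (bc : Int) (ps : List (Nat × Nat)) (g : List (List Int)) (i : Nat) :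
    ((applyU bc ps g).getD i []).length = (g.getD i []).length := by
  induction ps generalizing g with
  | nil => rfl
  | cons p t ih => simpa [applyU] using (ih (pvSet g p.1 p.2 bc)).trans (pvSet_rowlen ..)

theorem applyU_get (bc : Int) (ps : List (Nat × Nat)) (g : List (List Int)) (y x : Nat) :
    pvGet (applyU bc ps g) y x =
      if (y, x) ∈ ps ∧ y < g.length ∧ x < (g.getD y []).length then bc
      else pvGet g y x := by
  induction ps generalizing g with
  | nil => simp [applyU]
  | cons p t ih =>
    rw [show applyU bc (p :: t) g = applyU bc t (pvSet g p.1 p.2 bc) from rfl, ih,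
        pvSet_length, pvSet_rowlen, pvGet_pvSet]
    have hmem : ((y, x) ∈ p :: t) ↔ ((p.1 = y ∧ p.2 = x) ∨ (y, x) ∈ t) := by
      cases p; simp [eq_comm, and_comm, Prod.ext_iff]
    split_ifs with h1 h2 h3 <;> tauto

-- the coordinate rectangle
def allPairs (h w : Nat) : List (Nat × Nat) :=
  (List.range h).flatMap (fun y => (List.range w).map (fun x => (y, x)))

theorem mem_allPairs (h w : Nat) (p : Nat × Nat) :
    p ∈ allPairs h w ↔ p.1 < h ∧ p.2 < w := by
  cases p; simp [allPairs, List.mem_flatMap, List.mem_range, eq_comm, and_comm]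

-- A's per-cell condition, as a Bool on coordinates
def condA (grid : List (List Int)) (h w : Nat) (p : Nat × Nat) : Bool :=
  (pvGet grid p.1 p.2 != 0) &&
  (decide (p.1 = 0 ∨ p.1 = h - 1 ∨ p.2 = 0 ∨ p.2 = w - 1) ||
   [((-1 : Int), (0 : Int)), (1, 0), (0, -1), (0, 1)].any (fun d =>
     decide (0 ≤ (p.1 : Int) + d.1 ∧ (p.1 : Int) + d.1 < (h : Int) ∧
             0 ≤ (p.2 : Int) + d.2 ∧ (p.2 : Int) + d.2 < (w : Int)) &&
     decide (pvGet grid ((p.1 : Int) + d.1).toNat ((p.2 : Int) + d.2).toNat = 0)))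

-- B's pass-1 condition and pass-2 update list, on coordinates
def condB1 (grid : List (List Int)) (h w : Nat) (p : Nat × Nat) : Bool :=
  (pvGet grid p.1 p.2 != 0) && decide (p.1 = 0 ∨ p.1 = h - 1 ∨ p.2 = 0 ∨ p.2 = w - 1)

def nbrUpds (grid : List (List Int)) (h w : Nat) (p : Nat × Nat) : List (Nat × Nat) :=
  if pvGet grid p.1 p.2 = 0 then
    (([((p.1 : Int) - 1, (p.2 : Int)), ((p.1 : Int) + 1, (p.2 : Int)),
       ((p.1 : Int), (p.2 : Int) - 1), ((p.1 : Int), (p.2 : Int) + 1)]).filter (fun q =>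
        decide (0 ≤ q.1 ∧ q.1 < (h : Int) ∧ 0 ≤ q.2 ∧ q.2 < (w : Int) ∧
                pvGet grid q.1.toNat q.2.toNat ≠ 0))).map (fun q => (q.1.toNat, q.2.toNat))
  else []

theorem portA_mark_eq (grid : List (List Int)) (bc : Int) (h w : Nat) :
    (List.range h).foldl (fun result y =>
      (List.range w).foldl (fun result x =>
        if pvGet grid y x ≠ 0 then
          let isb : Bool :=
            if y = 0 ∨ y = h - 1 ∨ x = 0 ∨ x = w - 1 then true
            else
              [((-1 : Int), (0 : Int)), (1, 0), (0, -1), (0, 1)].any (fun d =>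
                decide (0 ≤ (y : Int) + d.1 ∧ (y : Int) + d.1 < (h : Int) ∧
                        0 ≤ (x : Int) + d.2 ∧ (x : Int) + d.2 < (w : Int)) &&
                decide (pvGet grid ((y : Int) + d.1).toNat ((x : Int) + d.2).toNat = 0))
          if isb then pvSet result y x bc
          else result
        else result) result) grid
    = applyU bc ((allPairs h w).filter (condA grid h w)) grid := by
  calc _ = (List.range h).foldl (fun r y => ((List.range w).map (fun x => (y, x))).foldl
        (fun r p => if condA grid h w p then pvSet r p.1 p.2 bc else r) r) grid := by
        apply PySem.List.foldl_congr_mem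
        intro acc y _
        rw [List.foldl_map]
        apply PySem.List.foldl_congr_mem
        intro r x _
        by_cases h1 : pvGet grid y x = 0
        · simp [condA, h1]
        · by_cases h2 : y = 0 ∨ y = h - 1 ∨ x = 0 ∨ x = w - 1
          · simp [condA, h1, h2]
          · simp [condA, h1, h2]
    _ = (allPairs h w).foldl
        (fun r p => if condA grid h w p then pvSet r p.1 p.2 bc else r) grid :=
        (List.foldl_flatMap ..).symm
    _ = _ := PySem.List.foldl_if_eq_foldl_filter ..

theorem portB_mark_eq (grid res1 : List (List Int)) (bc : Int) (h w : Nat) :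
    (List.range h).foldl (fun res y =>
      (List.range w).foldl (fun res x =>
        if pvGet grid y x = 0 then
          [((y : Int) - 1, (x : Int)), ((y : Int) + 1, (x : Int)),
           ((y : Int), (x : Int) - 1), ((y : Int), (x : Int) + 1)].foldl (fun res q =>
            if 0 ≤ q.1 ∧ q.1 < (h : Int) ∧ 0 ≤ q.2 ∧ q.2 < (w : Int) ∧
                pvGet grid q.1.toNat q.2.toNat ≠ 0 then
              pvSet res q.1.toNat q.2.toNat bc
            else res) res
        else res) res) res1
    = applyU bc ((allPairs h w).flatMap (nbrUpds grid h w)) res1 := by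
  have step1 : (List.range h).foldl (fun res y =>
      (List.range w).foldl (fun res x =>
        if pvGet grid y x = 0 then
          [((y : Int) - 1, (x : Int)), ((y : Int) + 1, (x : Int)),
           ((y : Int), (x : Int) - 1), ((y : Int), (x : Int) + 1)].foldl (fun res q =>
            if 0 ≤ q.1 ∧ q.1 < (h : Int) ∧ 0 ≤ q.2 ∧ q.2 < (w : Int) ∧
                pvGet grid q.1.toNat q.2.toNat ≠ 0 then
              pvSet res q.1.toNat q.2.toNat bc
            else res) res
        else res) res) res1
      = (List.range h).foldl (fun r y => ((List.range w).map (fun x => (y, x))).foldl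
        (fun r p => (nbrUpds grid h w p).foldl (fun r q => pvSet r q.1 q.2 bc) r) r) res1 := by
    apply PySem.List.foldl_congr_mem
    intro acc y _
    rw [List.foldl_map]
    apply PySem.List.foldl_congr_mem
    intro r x _
    by_cases h1 : pvGet grid y x = 0
    · rw [if_pos h1]
      have hu : nbrUpds grid h w (y, x) =
          (([((y : Int) - 1, (x : Int)), ((y : Int) + 1, (x : Int)),
             ((y : Int), (x : Int) - 1), ((y : Int), (x : Int) + 1)]).filter (fun q =>
              decide (0 ≤ q.1 ∧ q.1 < (h : Int) ∧ 0 ≤ q.2 ∧ q.2 < (w : Int) ∧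
                      pvGet grid q.1.toNat q.2.toNat ≠ 0))).map (fun q => (q.1.toNat, q.2.toNat)) := by
        simp [nbrUpds, h1]
      rw [hu, List.foldl_map,
        ← PySem.List.foldl_if_eq_foldl_filter
          (fun q : Int × Int => decide (0 ≤ q.1 ∧ q.1 < (h : Int) ∧ 0 ≤ q.2 ∧ q.2 < (w : Int) ∧
            pvGet grid q.1.toNat q.2.toNat ≠ 0))
          (fun r (q : Int × Int) => pvSet r q.1.toNat q.2.toNat bc)]
      apply PySem.List.foldl_congr_mem
      intro acc q _
      simp
    · have hu : nbrUpds grid h w (y, x) = [] := by simp [nbrUpds, h1]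
      rw [hu]
      simp [h1]
  rw [step1, ← List.foldl_flatMap]
  show (allPairs h w).foldl _ res1 = _
  rw [applyU, List.foldl_flatMap]

theorem portB1_mark_eq (grid res0 : List (List Int)) (bc : Int) (h w : Nat) :
    (List.range h).foldl (fun res y =>
      (List.range w).foldl (fun res x =>
        if pvGet grid y x ≠ 0 ∧ (y = 0 ∨ y = h - 1 ∨ x = 0 ∨ x = w - 1) then
          pvSet res y x bc
        else res) res) res0
    = applyU bc ((allPairs h w).filter (condB1 grid h w)) res0 := by
  calc _ = (List.range h).foldl (fun r y => ((List.range w).map (fun x => (y, x))).foldl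
        (fun r p => if condB1 grid h w p then pvSet r p.1 p.2 bc else r) r) res0 := by
        apply PySem.List.foldl_congr_mem
        intro acc y _
        rw [List.foldl_map]
        apply PySem.List.foldl_congr_mem
        intro r x _
        by_cases h1 : pvGet grid y x = 0
        · simp [condB1, h1]
        · by_cases h2 : y = 0 ∨ y = h - 1 ∨ x = 0 ∨ x = w - 1
          · simp [condB1, h1, h2]
          · simp [condB1, h1, h2]
    _ = (allPairs h w).foldl
        (fun r p => if condB1 grid h w p then pvSet r p.1 p.2 bc else r) res0 :=
        (List.foldl_flatMap ..).symm
    _ = _ := PySem.List.foldl_if_eq_foldl_filter ..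

-- max colour: A's nested running-max loop equals B's clamped builtin max of the flattened grid
theorem max_color_eq (grid : List (List Int)) :
    grid.foldl (fun m row => row.foldl (fun m c => if c > m then c else m) m) 0
    = max 0 ((PySem.List.max? (grid.flatMap (fun row => row)) (fun c => c)).getD 0) := by
  have h1 : grid.foldl (fun m row => row.foldl (fun m c => if c > m then c else m) m) 0
      = (grid.flatMap (fun row => row)).foldl max 0 := by
    rw [List.foldl_flatMap]
    apply PySem.List.foldl_congr_mem
    intro acc row _
    apply PySem.List.foldl_congr_mem
    intro m c _
    split_ifs with h <;> omega
  rw [h1]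
  cases hf : grid.flatMap (fun row => row) with
  | nil => simp [PySem.List.max?]
  | cons a t =>
    rw [PySem.List.max?_id_cons, Option.getD_some, List.foldl_cons]
    exact List.foldl_assoc

-- the two marked sets coincide (within the rectangle)
theorem anyA_iff (grid : List (List Int)) (h w y x : Nat) (hy : y < h) (hx : x < w) :
    ([((-1 : Int), (0 : Int)), (1, 0), (0, -1), (0, 1)].any (fun d =>
       decide (0 ≤ (y : Int) + d.1 ∧ (y : Int) + d.1 < (h : Int) ∧
               0 ≤ (x : Int) + d.2 ∧ (x : Int) + d.2 < (w : Int)) &&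
       decide (pvGet grid ((y : Int) + d.1).toNat ((x : Int) + d.2).toNat = 0)) = true)
    ↔ ∃ z : Nat × Nat, z.1 < h ∧ z.2 < w ∧ pvGet grid z.1 z.2 = 0 ∧
        ((z.1 = y + 1 ∧ z.2 = x) ∨ (z.1 + 1 = y ∧ z.2 = x) ∨
         (z.1 = y ∧ z.2 = x + 1) ∨ (z.1 = y ∧ z.2 + 1 = x)) := by
  simp only [List.any_cons, List.any_nil, Bool.or_eq_true, Bool.and_eq_true,
    decide_eq_true_eq, Bool.false_eq_true, or_false]
  constructor
  · rintro (⟨hb, h0⟩ | ⟨hb, h0⟩ | ⟨hb, h0⟩ | ⟨hb, h0⟩)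
    · exact ⟨(y - 1, x), by omega, by omega, by convert h0 using 2 <;> omega, by omega⟩
    · exact ⟨(y + 1, x), by omega, by omega, by convert h0 using 2 <;> omega, by omega⟩
    · exact ⟨(y, x - 1), by omega, by omega, by convert h0 using 2 <;> omega, by omega⟩
    · exact ⟨(y, x + 1), by omega, by omega, by convert h0 using 2 <;> omega, by omega⟩
  · rintro ⟨z, hz1, hz2, h0, (⟨e1, e2⟩ | ⟨e1, e2⟩ | ⟨e1, e2⟩ | ⟨e1, e2⟩)⟩
    · exact Or.inr (Or.inl ⟨by omega, by convert h0 using 2 <;> omega⟩)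
    · exact Or.inl ⟨by omega, by convert h0 using 2 <;> omega⟩
    · exact Or.inr (Or.inr (Or.inr ⟨by omega, by convert h0 using 2 <;> omega⟩))
    · exact Or.inr (Or.inr (Or.inl ⟨by omega, by convert h0 using 2 <;> omega⟩))

theorem mem_nbrUpds_iff (grid : List (List Int)) (h w y x : Nat) (z : Nat × Nat) :
    ((y, x) ∈ nbrUpds grid h w z)
    ↔ pvGet grid z.1 z.2 = 0 ∧ pvGet grid y x ≠ 0 ∧ y < h ∧ x < w ∧
        ((z.1 = y + 1 ∧ z.2 = x) ∨ (z.1 + 1 = y ∧ z.2 = x) ∨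
         (z.1 = y ∧ z.2 = x + 1) ∨ (z.1 = y ∧ z.2 + 1 = x)) := by
  unfold nbrUpds
  by_cases hz : pvGet grid z.1 z.2 = 0
  · rw [if_pos hz]
    simp only [List.mem_map, List.mem_filter, List.mem_cons, List.not_mem_nil, or_false,
      decide_eq_true_eq, hz, true_and]
    constructor
    · rintro ⟨q, ⟨hqmem, hcond⟩, hq⟩
      rw [Prod.mk.injEq] at hq
      obtain ⟨hq1, hq2⟩ := hq
      rcases hqmem with rfl | rfl | rfl | rfl <;>
        dsimp only at hcond hq1 hq2 <;>
        obtain ⟨hb1, hb2, hb3, hb4, h0⟩ := hcond <;>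
        (try simp only [Int.toNat_natCast] at hq1 hq2)
      · rw [hq1, hq2] at h0
        exact ⟨h0, by omega, by omega, Or.inl ⟨by omega, by omega⟩⟩
      · rw [hq1, hq2] at h0
        exact ⟨h0, by omega, by omega, Or.inr (Or.inl ⟨by omega, by omega⟩)⟩
      · have e1 : ((z.1 : Nat) : Int).toNat = y := by omega
        rw [e1, hq2] at h0
        exact ⟨h0, by omega, by omega, Or.inr (Or.inr (Or.inl ⟨by omega, by omega⟩))⟩
      · have e1 : ((z.1 : Nat) : Int).toNat = y := by omega
        rw [e1, hq2] at h0
        exact ⟨h0, by omega, by omega, Or.inr (Or.inr (Or.inr ⟨by omega, by omega⟩))⟩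
    · rintro ⟨h0, hy, hx, (⟨e1, e2⟩ | ⟨e1, e2⟩ | ⟨e1, e2⟩ | ⟨e1, e2⟩)⟩
      · refine ⟨((z.1 : Int) - 1, (z.2 : Int)), ⟨by simp, by omega, by omega, by omega, by omega,
          by convert h0 using 2 <;> omega⟩, by simp [Prod.ext_iff]; omega⟩
      · refine ⟨((z.1 : Int) + 1, (z.2 : Int)), ⟨by simp, by omega, by omega, by omega, by omega,
          by convert h0 using 2 <;> omega⟩, by simp [Prod.ext_iff]; omega⟩
      · refine ⟨((z.1 : Int), (z.2 : Int) - 1), ⟨by simp, by omega, by omega, by omega, by omega,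
          by convert h0 using 2 <;> omega⟩, by simp [Prod.ext_iff]; omega⟩
      · refine ⟨((z.1 : Int), (z.2 : Int) + 1), ⟨by simp, by omega, by omega, by omega, by omega,
          by convert h0 using 2 <;> omega⟩, by simp [Prod.ext_iff]; omega⟩
  · rw [if_neg hz]
    simp [hz]

theorem cond_iff (grid : List (List Int)) (h w y x : Nat) (hy : y < h) (hx : x < w) :
    condA grid h w (y, x) = true ↔
      (condB1 grid h w (y, x) = true ∨ ∃ z ∈ allPairs h w, (y, x) ∈ nbrUpds grid h w z) := by
  have hA : condA grid h w (y, x) = true ↔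
      pvGet grid y x ≠ 0 ∧ ((y = 0 ∨ y = h - 1 ∨ x = 0 ∨ x = w - 1) ∨
        ∃ z : Nat × Nat, z.1 < h ∧ z.2 < w ∧ pvGet grid z.1 z.2 = 0 ∧
          ((z.1 = y + 1 ∧ z.2 = x) ∨ (z.1 + 1 = y ∧ z.2 = x) ∨
           (z.1 = y ∧ z.2 = x + 1) ∨ (z.1 = y ∧ z.2 + 1 = x))) := by
    rw [← anyA_iff grid h w y x hy hx]
    simp [condA]
  have hB1 : condB1 grid h w (y, x) = true ↔
      pvGet grid y x ≠ 0 ∧ (y = 0 ∨ y = h - 1 ∨ x = 0 ∨ x = w - 1) := by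
    simp [condB1]
  rw [hA, hB1]
  constructor
  · rintro ⟨hnz, (he | ⟨z, hz1, hz2, h0, hadj⟩)⟩
    · exact Or.inl ⟨hnz, he⟩
    · exact Or.inr ⟨z, (mem_allPairs h w z).2 ⟨hz1, hz2⟩,
        (mem_nbrUpds_iff grid h w y x z).2 ⟨h0, hnz, hy, hx, hadj⟩⟩
  · rintro (⟨hnz, he⟩ | ⟨z, hzmem, hzup⟩)
    · exact ⟨hnz, Or.inl he⟩
    · obtain ⟨h0, hnz, -, -, hadj⟩ := (mem_nbrUpds_iff grid h w y x z).1 hzup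
      obtain ⟨hz1, hz2⟩ := (mem_allPairs h w z).1 hzmem
      exact ⟨hnz, Or.inr ⟨z, hz1, hz2, h0, hadj⟩⟩

theorem pvGet_eq_getElem (g : List (List Int)) (y x : Nat) (hy : y < g.length)
    (hx : x < (g[y]'hy).length) : pvGet g y x = (g[y]'hy)[x]'hx := by
  simp [pvGet, List.getD_eq_getElem?_getD, List.getElem?_eq_getElem hy,
    List.getElem?_eq_getElem hx]

theorem applyU_ext (bc : Int) (ps qs : List (Nat × Nat)) (g : List (List Int))
    (hiff : ∀ y x : Nat, ((y, x) ∈ ps ↔ (y, x) ∈ qs)) :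
    applyU bc ps g = applyU bc qs g := by
  apply List.ext_getElem (by rw [applyU_length, applyU_length])
  intro y h1 h2
  apply List.ext_getElem
  · have e1 := applyU_rowlen bc ps g y
    have e2 := applyU_rowlen bc qs g y
    rw [List.getD_eq_getElem _ _ h1] at e1
    rw [List.getD_eq_getElem _ _ h2] at e2
    rw [e1, e2]
  · intro x hx1 hx2
    have hyg : y < g.length := by rw [applyU_length] at h1; exact h1
    have hxg : x < (g.getD y []).length := by
      have := applyU_rowlen bc ps g y
      rw [List.getD_eq_getElem _ _ h1] at this
      omega
    rw [← pvGet_eq_getElem _ _ _ h1 hx1, ← pvGet_eq_getElem _ _ _ h2 hx2,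
      applyU_get, applyU_get]
    have hxy := hiff y x
    split_ifs with h1 h2 <;> tauto

theorem applyU_append (bc : Int) (ps qs : List (Nat × Nat)) (g : List (List Int)) :
    applyU bc (ps ++ qs) g = applyU bc qs (applyU bc ps g) := List.foldl_append

theorem detect_eq (grid : List (List Int)) :
    detect_and_mark_boundary grid = detect_and_mark_boundary_alt grid := by
  by_cases hg : grid = [] ∨ grid.headD [] = []
  · simp only [detect_and_mark_boundary, detect_and_mark_boundary_alt, if_pos hg]
  · simp only [detect_and_mark_boundary, detect_and_mark_boundary_alt, pyMarkBoundary, hg,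
      if_false, List.map_id']
    rw [max_color_eq grid, portA_mark_eq, portB1_mark_eq, portB_mark_eq, ← applyU_append]
    apply applyU_ext
    intro y x
    simp only [List.mem_filter, List.mem_append, List.mem_flatMap]
    constructor
    · rintro ⟨hmem, hca⟩
      obtain ⟨hy, hx⟩ := (mem_allPairs _ _ _).1 hmem
      rcases (cond_iff grid _ _ y x hy hx).1 hca with hb | ⟨z, hz, hup⟩
      · exact Or.inl ⟨hmem, hb⟩
      · exact Or.inr ⟨z, hz, hup⟩
    · rintro (⟨hmem, hcb⟩ | ⟨z, hz, hup⟩)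
      · obtain ⟨hy, hx⟩ := (mem_allPairs _ _ _).1 hmem
        exact ⟨hmem, (cond_iff grid _ _ y x hy hx).2 (Or.inl hcb)⟩
      · obtain ⟨-, -, hy, hx, -⟩ := (mem_nbrUpds_iff grid _ _ y x z).1 hup
        exact ⟨(mem_allPairs _ _ _).2 ⟨hy, hx⟩,
          (cond_iff grid _ _ y x hy hx).2 (Or.inr ⟨z, hz, hup⟩)⟩

-- ===== VERDICT (by name: the statement is the Claim_ definition above) =====
theorem detect_and_mark_boundary_spec : Claim_equal_detect_and_mark_boundary := by
  intro grid _ _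
  exact detect_eq grid
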